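-- pv_equiv track=rewrite | github.com/FacuMastri/7541-Algo2 | Ejercicios-parcialito-4/pdinamica_trabajos_faciles_dificiles.py | calcular_ganancia
-- ===== SOURCE A (Python) =====
-- def calcular_ganancia(facil, dificil, dias):
--
-- 	# Creo el array de ganancias lleno de 0
-- 	ganancia = [0 for x in range(dias + 1)]
--
-- 	# Recorro todo llenando segun la ecuacion
-- 	# de recurrencia
-- 	for i in range(len(ganancia)):
-- 		if i == 0:
-- 			ganancia[i] = 0
-- 		elif i == 1:
-- 			ganancia[i] = facil[i]
-- 		else:
-- 			ganancia[i] = max(ganancia[i - 1] + facil[i], ganancia[i - 2] + dificil[i])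
--
-- 	return ganancia[dias]
-- ===== SOURCE B (Python) =====
-- def calcular_ganancia(facil, dificil, dias):
--     # Max-plus (tropical) linear algebra: day i is the 2x2 matrix
--     # [[facil[i], dificil[i]], [0, -inf]] acting on the state (g[i-1], g[i-2]);
--     # the answer is the accumulated matrix product applied to the base vector
--     # (facil[1], 0).  None plays the role of -infinity.
--     if dias == 0:
--         return 0
--
--     def tadd(a, b):
--         return None if a is None or b is None else a + b
--
--     def tmax(a, b):
--         if a is None:
--             return b
--         if b is None:
--             return a
--         return max(a, b)
--
--     def matmul(A, B):
--         return tuple(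
--             tuple(tmax(tadd(A[r][0], B[0][c]), tadd(A[r][1], B[1][c])) for c in range(2))
--             for r in range(2)
--         )
--
--     P = ((0, None), (None, 0))  # max-plus identity matrix
--     for i in range(dias, 1, -1):
--         P = matmul(P, ((facil[i], dificil[i]), (0, None)))
--     v = (facil[1], 0)
--     return tmax(tadd(P[0][0], v[0]), tadd(P[0][1], v[1]))
-- ===== Notes on version B (the rewrite author's own statement) =====
-- stated objective: alternative
-- what changed: Replaces the DP table filled by an index loop with tropical (max-plus) linear algebra: each day i becomes the 2x2 max-plus matrix [[facil[i],dificil[i]],[0,-inf]], the matrices are multiplied into an accumulated product, and the answer is the first component of that product applied to the base vector (facil[1],0), with None standing for -infinity.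
import Mathlib
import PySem

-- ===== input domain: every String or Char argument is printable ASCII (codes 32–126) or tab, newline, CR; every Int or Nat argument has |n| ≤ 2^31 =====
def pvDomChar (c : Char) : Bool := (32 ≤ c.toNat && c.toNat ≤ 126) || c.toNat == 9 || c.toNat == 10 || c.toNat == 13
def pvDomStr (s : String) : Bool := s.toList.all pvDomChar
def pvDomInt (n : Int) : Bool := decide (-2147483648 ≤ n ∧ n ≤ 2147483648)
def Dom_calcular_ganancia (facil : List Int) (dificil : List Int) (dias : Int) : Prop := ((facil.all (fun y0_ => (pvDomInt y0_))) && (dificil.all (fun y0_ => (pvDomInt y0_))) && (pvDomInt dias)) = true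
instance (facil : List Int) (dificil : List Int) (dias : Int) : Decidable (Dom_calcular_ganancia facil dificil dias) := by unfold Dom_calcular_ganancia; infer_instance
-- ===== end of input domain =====

-- B recasts the DP as a product of 2x2 max-plus (tropical) matrices applied to the base
-- vector (facil[1], 0) — a different algorithm, same return value on Pre_.

-- ===== PORT A =====
def calcular_ganancia (facil : List Int) (dificil : List Int) (dias : Int) : Int :=
  -- ganancia = [0 for x in range(dias + 1)]
  let ganancia : List Int := (PySem.List.pyRange 0 (dias + 1) 1).map (fun _ => (0 : Int))
  -- for i in range(len(ganancia)): …  (indexing ported with pyGetD/pySetD; out-of-range accesses are excluded by Pre_)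
  let ganancia := (PySem.List.pyRange 0 (ganancia.length : Int) 1).foldl
    (fun g i =>
      if i = 0 then PySem.List.pySetD g i 0
      else if i = 1 then PySem.List.pySetD g i (PySem.List.pyGetD facil i 0)
      else PySem.List.pySetD g i
        (max (PySem.List.pyGetD g (i - 1) 0 + PySem.List.pyGetD facil i 0)
             (PySem.List.pyGetD g (i - 2) 0 + PySem.List.pyGetD dificil i 0))) ganancia
  PySem.List.pyGetD ganancia dias 0

-- ===== PORT B =====
-- max-plus scalar addition: None plays -infinity (Source B's tadd)
def tadd (a b : Option Int) : Option Int :=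
  match a, b with
  | some x, some y => some (x + y)
  | _, _ => none

-- max-plus scalar max (Source B's tmax)
def tmax (a b : Option Int) : Option Int :=
  match a, b with
  | none, b => b
  | some x, none => some x
  | some x, some y => some (max x y)

-- 2x2 max-plus matrix product (Source B's matmul, the 2x2 comprehension written out)
def matmul (A B : (Option Int × Option Int) × (Option Int × Option Int)) :
    (Option Int × Option Int) × (Option Int × Option Int) :=
  ((tmax (tadd A.1.1 B.1.1) (tadd A.1.2 B.2.1), tmax (tadd A.1.1 B.1.2) (tadd A.1.2 B.2.2)),
   (tmax (tadd A.2.1 B.1.1) (tadd A.2.2 B.2.1), tmax (tadd A.2.1 B.1.2) (tadd A.2.2 B.2.2)))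

def calcular_ganancia_alt (facil : List Int) (dificil : List Int) (dias : Int) : Int :=
  if dias = 0 then 0
  else
    let P := (PySem.List.pyRange dias 1 (-1)).foldl
      (fun P i => matmul P ((some (PySem.List.pyGetD facil i 0), some (PySem.List.pyGetD dificil i 0)),
                            (some 0, none)))
      ((some 0, none), (none, some 0))
    let v : Int × Int := (PySem.List.pyGetD facil 1 0, 0)
    -- Source B returns tmax(...) directly; it is provably 'some' here, `.getD 0` only extracts it
    (tmax (tadd P.1.1 (some v.1)) (tadd P.1.2 (some v.2))).getD 0

-- ===== PRECONDITION & SPEC =====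
-- Pre_: exactly where Python A returns: dias ≥ 0 (else ganancia[dias] is an IndexError on the empty
-- table) and facil/dificil long enough for the indices the loop actually reads.
def Pre_calcular_ganancia (facil : List Int) (dificil : List Int) (dias : Int) : Prop :=
  0 ≤ dias ∧ (1 ≤ dias → dias < (facil.length : Int)) ∧ (2 ≤ dias → dias < (dificil.length : Int))
instance (facil : List Int) (dificil : List Int) (dias : Int) : Decidable (Pre_calcular_ganancia facil dificil dias) := by unfold Pre_calcular_ganancia; infer_instance

def pvWitness_calcular_ganancia : List Int × List Int × Int := ([0, 3, 5, 2], [0, 1, 4, 6], 3)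

def Spec_calcular_ganancia (facil : List Int) (dificil : List Int) (dias : Int) (out : Int) : Prop := out = calcular_ganancia_alt facil dificil dias
instance (facil : List Int) (dificil : List Int) (dias : Int) (out : Int) : Decidable (Spec_calcular_ganancia facil dificil dias out) := by unfold Spec_calcular_ganancia; infer_instance

-- ===== CLAIM (what is proved, stated in full; the proofs are below) =====
def Claim_equal_calcular_ganancia : Prop := ∀ (facil : List Int) (dificil : List Int) (dias : Int), Dom_calcular_ganancia facil dificil dias → Pre_calcular_ganancia facil dificil dias → Spec_calcular_ganancia facil dificil dias (calcular_ganancia facil dificil dias)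

-- ===== LEMMAS AND PROOFS =====

-- The recurrence A's table realises (used as the common reference value).
def Gref (facil dificil : List Int) : Nat → Int
  | 0 => 0
  | 1 => facil.getD 1 0
  | (n + 2) => max (Gref facil dificil (n + 1) + facil.getD (n + 2) 0)
               (Gref facil dificil n + dificil.getD (n + 2) 0)

theorem getD_set_ne (l : List Int) (n j : Nat) (v d : Int) (h : j ≠ n) :
    (l.set n v).getD j d = l.getD j d := by
  simp [List.getD, Ne.symm h]

theorem getD_set_self (l : List Int) (n : Nat) (v d : Int) (h : n < l.length) :
    (l.set n v).getD n d = v := by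
  simp [List.getD, h]

-- A's loop body, named for the proofs (definitionally the lambda in the port).
def stepA (facil dificil : List Int) (g : List Int) (i : Int) : List Int :=
  if i = 0 then PySem.List.pySetD g i 0
  else if i = 1 then PySem.List.pySetD g i (PySem.List.pyGetD facil i 0)
  else PySem.List.pySetD g i
    (max (PySem.List.pyGetD g (i - 1) 0 + PySem.List.pyGetD facil i 0)
         (PySem.List.pyGetD g (i - 2) 0 + PySem.List.pyGetD dificil i 0))

-- A's loop, processed up to index k, fills positions < k with Gref.
theorem loopA (facil dificil : List Int) (g0 : List Int) :
    ∀ k : Nat, k ≤ g0.length →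
      ((PySem.List.pyRange 0 (k : Int) 1).foldl (stepA facil dificil) g0).length = g0.length ∧
      ∀ j : Nat, j < k →
        ((PySem.List.pyRange 0 (k : Int) 1).foldl (stepA facil dificil) g0).getD j 0
          = Gref facil dificil j := by
  intro k
  induction k with
  | zero =>
    intro _
    rw [PySem.List.pyRange_one_eq_nil (by omega)]
    exact ⟨rfl, fun j hj => absurd hj (by omega)⟩
  | succ k ih =>
    intro hk
    obtain ⟨hlen, hval⟩ := ih (by omega)
    have hsplit : PySem.List.pyRange 0 ((k + 1 : Nat) : Int) 1
        = PySem.List.pyRange 0 (k : Int) 1 ++ [(k : Int)] := by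
      push_cast
      exact PySem.List.pyRange_one_succ_right (by omega)
    rw [hsplit, List.foldl_append]
    simp only [List.foldl_cons, List.foldl_nil]
    set G := (PySem.List.pyRange 0 (k : Int) 1).foldl (stepA facil dificil) g0 with hG
    match k, hk, hlen, hval with
    | 0, hk, hlen, hval =>
      have hstep : stepA facil dificil G ((0 : Nat) : Int) = G.set 0 0 := by
        unfold stepA
        rw [if_pos (by norm_num), PySem.List.pySetD_natCast]
      rw [hstep]
      refine ⟨by simp [hlen], ?_⟩
      intro j hj
      interval_cases j
      rw [getD_set_self _ _ _ _ (by rw [hlen]; omega)]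
      rfl
    | 1, hk, hlen, hval =>
      have hstep : stepA facil dificil G ((1 : Nat) : Int) = G.set 1 (facil.getD 1 0) := by
        unfold stepA
        rw [if_neg (by omega), if_pos (by norm_num), PySem.List.pySetD_natCast,
          PySem.List.pyGetD_natCast]
      rw [hstep]
      refine ⟨by simp [hlen], ?_⟩
      intro j hj
      interval_cases j
      · rw [getD_set_ne _ _ _ _ _ (by omega)]
        exact hval 0 (by omega)
      · rw [getD_set_self _ _ _ _ (by rw [hlen]; omega)]
        rfl
    | (m + 2), hk, hlen, hval =>
      have hstep : stepA facil dificil G ((m + 2 : Nat) : Int)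
          = G.set (m + 2) (max (G.getD (m + 1) 0 + facil.getD (m + 2) 0)
              (G.getD m 0 + dificil.getD (m + 2) 0)) := by
        unfold stepA
        rw [if_neg (by omega), if_neg (by omega),
          show ((m + 2 : Nat) : Int) - 1 = ((m + 1 : Nat) : Int) from by push_cast; ring,
          show ((m + 2 : Nat) : Int) - 2 = ((m : Nat) : Int) from by push_cast; ring,
          PySem.List.pySetD_natCast, PySem.List.pyGetD_natCast, PySem.List.pyGetD_natCast,
          PySem.List.pyGetD_natCast, PySem.List.pyGetD_natCast]
      rw [hstep, hval (m + 1) (by omega), hval m (by omega)]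
      refine ⟨by simp [hlen], ?_⟩
      intro j hj
      rcases Nat.lt_or_ge j (m + 2) with hlt | hge
      · rw [getD_set_ne _ _ _ _ _ (by omega)]
        exact hval j hlt
      · have hj2 : j = m + 2 := by omega
        subst hj2
        rw [getD_set_self _ _ _ _ (by rw [hlen]; omega)]
        rfl

theorem A_eq (facil dificil : List Int) (dias : Int) (h0 : 0 ≤ dias) :
    calcular_ganancia facil dificil dias = Gref facil dificil dias.toNat := by
  have hN : ((PySem.List.pyRange 0 (dias + 1) 1).map (fun _ => (0 : Int))).length
      = dias.toNat + 1 := by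
    simp [PySem.List.length_pyRange_one]
    omega
  obtain ⟨_, hval⟩ := loopA facil dificil
    ((PySem.List.pyRange 0 (dias + 1) 1).map (fun _ => (0 : Int))) (dias.toNat + 1) (by omega)
  unfold calcular_ganancia
  simp only [hN]
  rw [PySem.List.pyGetD_of_nonneg _ 0 h0]
  exact hval dias.toNat (by omega)

-- ---- B side: max-plus algebra ----

theorem tadd_assoc (a b c : Option Int) : tadd (tadd a b) c = tadd a (tadd b c) := by
  cases a <;> cases b <;> cases c <;> simp [tadd, add_assoc]

theorem tadd_tmax_right (a b c : Option Int) :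
    tadd (tmax a b) c = tmax (tadd a c) (tadd b c) := by
  cases a <;> cases b <;> cases c <;> simp [tadd, tmax, max_add_add_right]

theorem tadd_tmax_left (a b c : Option Int) :
    tadd a (tmax b c) = tmax (tadd a b) (tadd a c) := by
  cases a <;> cases b <;> cases c <;> simp [tadd, tmax, max_add_add_left]

theorem tmax_comm (a b : Option Int) : tmax a b = tmax b a := by
  cases a <;> cases b <;> simp [tmax, max_comm]

theorem tmax_assoc (a b c : Option Int) : tmax (tmax a b) c = tmax a (tmax b c) := by
  cases a <;> cases b <;> cases c <;> simp [tmax, max_assoc]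

theorem tmax_swap (a b c d : Option Int) :
    tmax (tmax a b) (tmax c d) = tmax (tmax a c) (tmax b d) := by
  rw [tmax_assoc, ← tmax_assoc b c d, tmax_comm b c, tmax_assoc, ← tmax_assoc]

-- The action of a matrix on a column vector.
def matvec (A : (Option Int × Option Int) × (Option Int × Option Int))
    (w : Option Int × Option Int) : Option Int × Option Int :=
  (tmax (tadd A.1.1 w.1) (tadd A.1.2 w.2), tmax (tadd A.2.1 w.1) (tadd A.2.2 w.2))

theorem matvec_matmul (A B : (Option Int × Option Int) × (Option Int × Option Int))
    (w : Option Int × Option Int) :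
    matvec (matmul A B) w = matvec A (matvec B w) := by
  simp only [matvec, matmul, tadd_tmax_right, tadd_tmax_left, tadd_assoc]
  exact Prod.ext (tmax_swap _ _ _ _) (tmax_swap _ _ _ _)

-- A left fold of matrix products, applied to a vector, is a right fold of actions.
theorem foldl_matmul_matvec (M : Int → (Option Int × Option Int) × (Option Int × Option Int)) :
    ∀ (l : List Int) (P0 : (Option Int × Option Int) × (Option Int × Option Int))
      (w : Option Int × Option Int),
      matvec (l.foldl (fun P i => matmul P (M i)) P0) w
        = matvec P0 (l.foldr (fun i u => matvec (M i) u) w) := by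
  intro l
  induction l with
  | nil => intro P0 w; rfl
  | cons i rest ih =>
    intro P0 w
    simp only [List.foldl_cons, List.foldr_cons]
    rw [ih, matvec_matmul]

theorem matvec_id (a b : Int) :
    matvec ((some 0, none), (none, some 0)) (some a, some b) = (some a, some b) := by
  simp [matvec, tadd, tmax]

theorem matvec_day (f d g1 g0 : Int) :
    matvec ((some f, some d), (some 0, none)) (some g1, some g0)
      = (some (max (g1 + f) (g0 + d)), some g1) := by
  simp [matvec, tadd, tmax, add_comm]

-- The right fold over the descending range computes (Gref n, Gref (n-1)).
theorem foldr_days (facil dificil : List Int) :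
    ∀ n : Nat, 1 ≤ n →
      (PySem.List.pyRange (n : Int) 1 (-1)).foldr
        (fun i u => matvec ((some (PySem.List.pyGetD facil i 0),
                             some (PySem.List.pyGetD dificil i 0)), (some 0, none)) u)
        (some (PySem.List.pyGetD facil 1 0), some 0)
      = (some (Gref facil dificil n), some (Gref facil dificil (n - 1))) := by
  intro n
  induction n with
  | zero => omega
  | succ m ih =>
    intro _
    by_cases hm : 1 ≤ m
    · rw [PySem.List.pyRange_neg_one_cons (by omega : (1 : Int) < ((m + 1 : Nat) : Int)),
        show ((m + 1 : Nat) : Int) - 1 = ((m : Nat) : Int) from by push_cast; ring]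
      simp only [List.foldr_cons]
      rw [ih hm, PySem.List.pyGetD_natCast, PySem.List.pyGetD_natCast, matvec_day]
      obtain ⟨k, hk⟩ : ∃ k, m = k + 1 := ⟨m - 1, by omega⟩
      subst hk
      simp only [Nat.add_sub_cancel]
      rfl
    · have hm0 : m = 0 := by omega
      subst hm0
      rw [show ((0 + 1 : Nat) : Int) = (1 : Int) from by norm_num,
        PySem.List.pyRange_neg_one_eq_nil (by omega)]
      simp only [List.foldr_nil]
      rw [show (1 : Int) = ((1 : Nat) : Int) from rfl, PySem.List.pyGetD_natCast]
      rfl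

theorem B_eq (facil dificil : List Int) (dias : Int) (h0 : 0 ≤ dias) :
    calcular_ganancia_alt facil dificil dias = Gref facil dificil dias.toNat := by
  by_cases hdz : dias = 0
  · subst hdz
    simp [calcular_ganancia_alt, Gref]
  · unfold calcular_ganancia_alt
    rw [if_neg hdz]
    have hcast : dias = (dias.toNat : Int) := by omega
    have hfold := foldl_matmul_matvec
      (fun i => ((some (PySem.List.pyGetD facil i 0), some (PySem.List.pyGetD dificil i 0)),
                 (some 0, none)))
      (PySem.List.pyRange dias 1 (-1))
      ((some 0, none), (none, some 0))
      (some (PySem.List.pyGetD facil 1 0), some 0)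
    have hdays := foldr_days facil dificil dias.toNat (by omega)
    rw [← hcast] at hdays
    rw [hdays, matvec_id] at hfold
    -- the returned scalar is the first component of the matrix-vector action
    have hfst : ∀ P : (Option Int × Option Int) × (Option Int × Option Int),
        tmax (tadd P.1.1 (some (PySem.List.pyGetD facil 1 0))) (tadd P.1.2 (some 0))
          = (matvec P (some (PySem.List.pyGetD facil 1 0), some 0)).1 := fun _ => rfl
    simp only [hfst, hfold]
    rfl

-- ===== VERDICT (by name: the statement is the Claim_ definition above) =====
theorem calcular_ganancia_spec : Claim_equal_calcular_ganancia := by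
  intro facil dificil dias _hdom hpre
  unfold Spec_calcular_ganancia
  rw [A_eq facil dificil dias hpre.1, B_eq facil dificil dias hpre.1]
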